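-- pv_equiv track=rewrite | github.com/arsyiadlani/Batik-Image-Pattern-Classification | b_action.py | false_negative
-- ===== SOURCE A (Python) =====
-- def false_negative(cm):
--   kawung = 0
--   mega = 0
--   parang = 0
--   truntum = 0
--   for i in range(4):
--     for j in range(4):
--       if i!=0 and j==0:
--         kawung += cm[i][j]
--       if i!=1 and j==1:
--         mega += cm[i][j]
--       if i!=2 and j==2:
--         parang += cm[i][j]
--       if i!=3 and j==3:
--         truntum += cm[i][j]
--   return [kawung, mega, parang, truntum]
-- ===== SOURCE B (Python) =====
-- def false_negative(cm):
--     totals = [0, 0, 0, 0]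
--     for row in cm[:4]:
--         totals = [t + x for t, x in zip(totals, row)]
--     return [totals[c] - cm[c][c] for c in range(4)]
-- ===== Notes on version B (the rewrite author's own statement) =====
-- stated objective: alternative
-- what changed: B works in two stages: it first accumulates the full column totals by element-wise vector addition of the first four rows (zip), then subtracts the diagonal cm[c][c] from each total, instead of A's single interleaved nested loop that tests i!=c,j==c and keeps four named accumulators.
import Mathlib
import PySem

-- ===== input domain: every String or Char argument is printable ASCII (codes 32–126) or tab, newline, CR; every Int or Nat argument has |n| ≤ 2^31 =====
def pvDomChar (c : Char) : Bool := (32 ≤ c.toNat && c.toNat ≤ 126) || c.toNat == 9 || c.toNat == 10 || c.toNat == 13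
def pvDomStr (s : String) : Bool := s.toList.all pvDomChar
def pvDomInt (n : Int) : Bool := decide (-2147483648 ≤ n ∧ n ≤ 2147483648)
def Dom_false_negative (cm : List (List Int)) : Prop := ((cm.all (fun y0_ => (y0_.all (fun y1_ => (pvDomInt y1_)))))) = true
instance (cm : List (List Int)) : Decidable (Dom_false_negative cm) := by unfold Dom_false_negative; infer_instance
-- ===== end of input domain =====

-- B computes full column totals by element-wise vector addition of the first four rows and
-- then subtracts the diagonal, instead of A's interleaved nested loop with four accumulators.

-- ===== PORT A =====
-- cm[i][j] is ported with pyGetD; the default only stands in for the IndexError case, which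
-- Pre_false_negative excludes (inside Pre_ every access is in range, so this is exact).
def pyCell (cm : List (List Int)) (i j : Int) : Int :=
  PySem.List.pyGetD (PySem.List.pyGetD cm i []) j 0

def false_negative (cm : List (List Int)) : List Int :=
  let st :=
    (PySem.List.pyRange 0 4 1).foldl (fun st i =>
      (PySem.List.pyRange 0 4 1).foldl (fun st j =>
        let (kawung, mega, parang, truntum) := st
        let kawung := if i ≠ 0 ∧ j = 0 then kawung + pyCell cm i j else kawung
        let mega := if i ≠ 1 ∧ j = 1 then mega + pyCell cm i j else mega
        let parang := if i ≠ 2 ∧ j = 2 then parang + pyCell cm i j else parang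
        let truntum := if i ≠ 3 ∧ j = 3 then truntum + pyCell cm i j else truntum
        (kawung, mega, parang, truntum)) st) ((0 : Int), (0 : Int), (0 : Int), (0 : Int))
  [st.1, st.2.1, st.2.2.1, st.2.2.2]

-- ===== PORT B =====
-- stage 1: totals = element-wise sum of cm[:4] (zip truncates, exactly as Python's zip);
-- stage 2: totals[c] - cm[c][c] for c in range(4).  Defaults are unreachable inside Pre_.
def false_negative_alt (cm : List (List Int)) : List Int :=
  let totals :=
    (PySem.List.slice cm none (some 4)).foldl
      (fun totals row => (totals.zip row).map (fun p => p.1 + p.2)) [0, 0, 0, 0]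
  (PySem.List.pyRange 0 4 1).map (fun c =>
    PySem.List.pyGetD totals c 0
      - PySem.List.pyGetD (PySem.List.pyGetD cm c []) c 0)

-- ===== PRECONDITION & SPEC =====
-- Pre_ excludes exactly the inputs where A raises IndexError: fewer than 4 rows, or one of
-- the first 4 rows shorter than 4.
def Pre_false_negative (cm : List (List Int)) : Prop :=
  4 ≤ cm.length ∧ ∀ r ∈ cm.take 4, 4 ≤ r.length
instance (cm : List (List Int)) : Decidable (Pre_false_negative cm) := by
  unfold Pre_false_negative; infer_instance

def pvWitness_false_negative : List (List Int) :=
  [[1,2,3,4],[5,6,7,8],[9,10,11,12],[13,14,15,16]]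

def Spec_false_negative (cm : List (List Int)) (out : List Int) : Prop := out = false_negative_alt cm
instance (cm : List (List Int)) (out : List Int) : Decidable (Spec_false_negative cm out) := by unfold Spec_false_negative; infer_instance

-- ===== CLAIM (what is proved, stated in full; the proofs are below) =====
def Claim_equal_false_negative : Prop := ∀ (cm : List (List Int)), Dom_false_negative cm → Pre_false_negative cm → Spec_false_negative cm (false_negative cm)

-- ===== LEMMAS AND PROOFS =====

-- pyGetD on a cons-list at the small literal indices used here (4x4 shape)
theorem pyGetD_lit_one {α : Type} (x0 x1 : α) (xs : List α) (d : α) :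
    PySem.List.pyGetD (x0 :: x1 :: xs) 1 d = x1 := by
  rw [PySem.List.pyGetD_eq_getElem _ _ (by omega) (by simp only [List.length_cons]; push_cast; omega)]; rfl

theorem pyGetD_lit_two {α : Type} (x0 x1 x2 : α) (xs : List α) (d : α) :
    PySem.List.pyGetD (x0 :: x1 :: x2 :: xs) 2 d = x2 := by
  rw [PySem.List.pyGetD_eq_getElem _ _ (by omega) (by simp only [List.length_cons]; push_cast; omega)]; rfl

theorem pyGetD_lit_three {α : Type} (x0 x1 x2 x3 : α) (xs : List α) (d : α) :
    PySem.List.pyGetD (x0 :: x1 :: x2 :: x3 :: xs) 3 d = x3 := by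
  rw [PySem.List.pyGetD_eq_getElem _ _ (by omega) (by simp only [List.length_cons]; push_cast; omega)]; rfl

-- ===== VERDICT (by name: the statement is the Claim_ definition above) =====
theorem false_negative_spec : Claim_equal_false_negative := by
  intro cm _ hpre
  obtain ⟨hlen, hrows⟩ := hpre
  match cm, hlen with
  | r0 :: r1 :: r2 :: r3 :: rest, _ =>
    have h0 := hrows r0 (by simp)
    have h1 := hrows r1 (by simp)
    have h2 := hrows r2 (by simp)
    have h3 := hrows r3 (by simp)
    match r0, h0 with
    | a00 :: a01 :: a02 :: a03 :: t0, _ =>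
    match r1, h1 with
    | a10 :: a11 :: a12 :: a13 :: t1, _ =>
    match r2, h2 with
    | a20 :: a21 :: a22 :: a23 :: t2, _ =>
    match r3, h3 with
    | a30 :: a31 :: a32 :: a33 :: t3, _ =>
      have hr : PySem.List.pyRange 0 4 1 = [0, 1, 2, 3] := by decide
      have hs : PySem.List.slice
          (((a00 :: a01 :: a02 :: a03 :: t0) : List Int) ::
            (a10 :: a11 :: a12 :: a13 :: t1) :: (a20 :: a21 :: a22 :: a23 :: t2) ::
            (a30 :: a31 :: a32 :: a33 :: t3) :: rest) none (some 4) =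
          [a00 :: a01 :: a02 :: a03 :: t0, a10 :: a11 :: a12 :: a13 :: t1,
           a20 :: a21 :: a22 :: a23 :: t2, a30 :: a31 :: a32 :: a33 :: t3] := by
        rw [show ((4 : Int)) = ((4 : Nat) : Int) by norm_num, PySem.List.slice_to_natCast]
        rfl
      simp [Spec_false_negative, false_negative, false_negative_alt, pyCell, hr, hs,
        List.zip, List.zipWith, pyGetD_lit_one, pyGetD_lit_two, pyGetD_lit_three]
      omega
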